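-- pv_equiv track=rewrite | github.com/comalvirdi/CPE101 | PROJECT3/funcs.py | findBackward
-- ===== SOURCE A (Python) =====
-- def reverseList(puzzle):
-- 	reversedPuzzle = []
-- 	for i in puzzle:
-- 		substring = ""
-- 		for x in i:
-- 			substring = x + substring
-- 		reversedPuzzle.append(substring)
-- 	return reversedPuzzle
--
-- def findBackward(wordList, wordInfoList, puzzle):
-- 	newPuzzle = reverseList(puzzle)
-- 	allBackward = []
-- 	for i in range (len(newPuzzle)):
-- 		for l in wordList:
-- 			if l in newPuzzle[i]:
-- 				wordInfo = str(l) + ": (BACKWARD) row: "+ str(i) + " column: " + str(9-newPuzzle[i].index(l))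
-- 				wordInfoList[wordList.index(l)] = wordInfo
-- 	return wordInfoList
-- ===== SOURCE B (Python) =====
-- def findBackward(wordList, wordInfoList, puzzle):
--     # Precompute once: each word's reversal and its target slot (first index in wordList).
--     slot = {}
--     for j, w in enumerate(wordList):
--         if w not in slot:
--             slot[w] = j
--     targets = [(w, w[::-1], slot[w]) for w in wordList]
--     for i, row in enumerate(puzzle):
--         for w, rev, j in targets:
--             p = row.rfind(rev)
--             if p != -1:
--                 wordInfoList[j] = w + ": (BACKWARD) row: " + str(i) \
--                     + " column: " + str(9 - len(row) + len(w) + p)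
--     return wordInfoList
-- ===== Notes on version B (the rewrite author's own statement) =====
-- stated objective: alternative
-- what changed: B never builds the reversed grid: it reverses each word once, scans the original rows with rfind (A's .index on the reversed row is the rightmost match in the original, column = 9 - len(row) + len(word) + rfind), and precomputes each word's target slot in a dict built in one pass, replacing A's per-hit wordList.index rescans.
-- outside the precondition, e.g. on findBackward(['ab'], [], ['ba']): A raises IndexError, B raises IndexError
import Mathlib
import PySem

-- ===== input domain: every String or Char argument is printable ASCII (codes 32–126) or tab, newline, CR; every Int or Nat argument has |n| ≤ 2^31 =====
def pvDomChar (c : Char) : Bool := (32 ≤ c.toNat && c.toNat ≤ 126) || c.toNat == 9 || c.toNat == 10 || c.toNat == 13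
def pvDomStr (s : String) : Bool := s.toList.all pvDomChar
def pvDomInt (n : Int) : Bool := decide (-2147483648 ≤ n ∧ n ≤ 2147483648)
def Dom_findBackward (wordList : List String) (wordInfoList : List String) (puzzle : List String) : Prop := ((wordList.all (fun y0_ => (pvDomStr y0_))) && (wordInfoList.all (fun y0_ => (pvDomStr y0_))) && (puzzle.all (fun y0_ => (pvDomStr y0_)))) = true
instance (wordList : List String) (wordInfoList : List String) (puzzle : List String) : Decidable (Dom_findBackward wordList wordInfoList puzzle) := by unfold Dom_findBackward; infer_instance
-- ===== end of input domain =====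

-- B drops A's row-reversal pass: it reverses each word once (testing with rfind on the ORIGINAL
-- rows) and precomputes each word's reversal and target slot in one pass over wordList (a dict of
-- first indices), instead of reversing every row and rescanning wordList with .index on each hit.
-- Objective: alternative; same return value.  Both the Python A and the Python B assign into
-- wordInfoList in place; the theorems here are about the return value.

-- ===== PORT A =====
-- the string  l + ": (BACKWARD) row: " + str(i) + " column: " + str(col)  (identical text in A and B)
def pvMkInfo (l : String) (i : Int) (col : Int) : String :=
  String.ofList (l.toList ++ (": (BACKWARD) row: ").toList ++ PySem.Int.toChars i
    ++ (" column: ").toList ++ PySem.Int.toChars col)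

-- reverseList: for each row, substring = x + substring, character by character
def pvReverseList (puzzle : List String) : List (List Char) :=
  puzzle.map (fun i => i.toList.foldl (fun substring x => x :: substring) [])

def findBackward (wordList : List String) (wordInfoList : List String) (puzzle : List String) : List String :=
  let newPuzzle := pvReverseList puzzle
  (PySem.List.pyRange 0 (PySem.List.len newPuzzle) 1).foldl (fun acc i =>
    wordList.foldl (fun acc l =>
      if PySem.Chars.isIn l.toList (PySem.List.pyGetD newPuzzle i []) then
        -- wordInfoList[wordList.index(l)] = wordInfo ; the write is in range under Pre_ below
        PySem.List.pySetD acc (((PySem.List.index? wordList l).getD 0 : Nat) : Int)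
          (pvMkInfo l i (9 - PySem.Chars.find (PySem.List.pyGetD newPuzzle i []) l.toList))
      else acc) acc) wordInfoList

-- ===== PORT B =====
-- slot = {}; for j, w in enumerate(wordList):  if w not in slot: slot[w] = j
def pvSlots (wordList : List String) : PySem.Dict String Int :=
  (PySem.List.enumerate wordList 0).foldl
    (fun slot jw => if slot.contains jw.2 then slot else slot.insert jw.2 jw.1) PySem.Dict.empty

def findBackward_alt (wordList : List String) (wordInfoList : List String) (puzzle : List String) : List String :=
  let slot := pvSlots wordList
  -- targets = [(w, w[::-1], slot[w]) for w in wordList]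
  let targets := wordList.map (fun w =>
    (w, (PySem.Str.slice? w none none (-1)).getD "", slot.getD w 0))
  (PySem.List.enumerate puzzle 0).foldl (fun acc ir =>
    targets.foldl (fun acc t =>
      let p := PySem.Str.rfind ir.2 t.2.1
      if p ≠ -1 then
        PySem.List.pySetD acc t.2.2
          (pvMkInfo t.1 ir.1 (9 - PySem.Str.len ir.2 + PySem.Str.len t.1 + p))
      else acc) acc) wordInfoList

-- ===== PRECONDITION & SPEC =====
-- Pre_ excludes exactly the inputs on which the Python A raises IndexError: some word whose
-- reversal occurs in a puzzle row has its (first) index in wordList outside wordInfoList.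
def Pre_findBackward (wordList : List String) (wordInfoList : List String) (puzzle : List String) : Prop :=
  ∀ l ∈ wordList, (∃ row ∈ puzzle, PySem.Chars.isIn l.toList.reverse row.toList = true) →
    wordList.idxOf l < wordInfoList.length

instance (wordList : List String) (wordInfoList : List String) (puzzle : List String) : Decidable (Pre_findBackward wordList wordInfoList puzzle) := by unfold Pre_findBackward; infer_instance

def pvWitness_findBackward : List String × List String × List String :=
  (["ab", "zz"], ["?", "?"], ["xbay", "q"])

def Spec_findBackward (wordList : List String) (wordInfoList : List String) (puzzle : List String) (out : List String) : Prop := out = findBackward_alt wordList wordInfoList puzzle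
instance (wordList : List String) (wordInfoList : List String) (puzzle : List String) (out : List String) : Decidable (Spec_findBackward wordList wordInfoList puzzle out) := by unfold Spec_findBackward; infer_instance

-- ===== CLAIM (what is proved, stated in full; the proofs are below) =====
def Claim_equal_findBackward : Prop := ∀ (wordList : List String) (wordInfoList : List String) (puzzle : List String), Dom_findBackward wordList wordInfoList puzzle → Pre_findBackward wordList wordInfoList puzzle → Spec_findBackward wordList wordInfoList puzzle (findBackward wordList wordInfoList puzzle)

-- ===== LEMMAS AND PROOFS =====

-- rfind.go returns -1 (no occurrence at any p ≤ j) or the greatest occurrence p ≤ j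
theorem pvGoCases (s sub : List Char) (j : Nat) :
    (PySem.Chars.rfind.go s sub j = -1 ∧ ∀ p : Nat, p ≤ j → ¬ sub <+: s.drop p) ∨
    (∃ n : Nat, PySem.Chars.rfind.go s sub j = n ∧ n ≤ j ∧ sub <+: s.drop n ∧
      ∀ q : Nat, n < q → q ≤ j → ¬ sub <+: s.drop q) := by
  induction j with
  | zero =>
    rw [PySem.Chars.rfind.go.eq_def]
    by_cases h : sub.isPrefixOf s = true
    · right
      exact ⟨0, by simp [h], le_refl 0, by simpa using List.isPrefixOf_iff_prefix.mp h,
        fun q hq hq' => absurd (Nat.lt_of_lt_of_le hq hq') (lt_irrefl 0)⟩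
    · left
      refine ⟨by simp [h], fun p hp => ?_⟩
      interval_cases p
      simpa using fun hc => h (List.isPrefixOf_iff_prefix.mpr (by simpa using hc))
  | succ j ih =>
    rw [PySem.Chars.rfind.go.eq_def]
    by_cases h : sub.isPrefixOf (s.drop (j+1)) = true
    · right
      exact ⟨j+1, by simp [h], le_refl _, List.isPrefixOf_iff_prefix.mp h,
        fun q hq hq' => absurd (Nat.lt_of_lt_of_le hq hq') (lt_irrefl _)⟩
    · have hno : ¬ sub <+: s.drop (j+1) := fun hc => h (List.isPrefixOf_iff_prefix.mpr hc)
      rcases ih with ⟨h1, h2⟩ | ⟨n, h1, h2, h3, h4⟩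
      · left
        refine ⟨by simp [h, h1], fun p hp => ?_⟩
        rcases Nat.lt_or_ge p (j+1) with hp' | hp'
        · exact h2 p (Nat.lt_succ_iff.mp hp')
        · have : p = j + 1 := le_antisymm hp hp'
          simpa [this] using hno
      · right
        refine ⟨n, by simp [h, h1], Nat.le_succ_of_le h2, h3, fun q hq hq' => ?_⟩
        rcases Nat.lt_or_ge q (j+1) with hq'' | hq''
        · exact h4 q hq (Nat.lt_succ_iff.mp hq'')
        · have : q = j + 1 := le_antisymm hq' hq''
          simpa [this] using hno

-- an occurrence of a nonempty w at position k fits inside s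
theorem pvOccBound {s w : List Char} {k : Nat} (hw : w ≠ []) (h : w <+: s.drop k) :
    k + w.length ≤ s.length := by
  have hlen : w.length ≤ s.length - k := by simpa using h.length_le
  have hw1 := List.length_pos_of_ne_nil hw
  omega

-- v is a suffix of r.take t ↔ v occurs at position t - |v| in r
theorem pvSuffixTake {r v : List Char} {t : Nat} (ht : t ≤ r.length) (hv : v.length ≤ t) :
    v <:+ r.take t ↔ v <+: r.drop (t - v.length) := by
  constructor
  · rintro ⟨pre, hpre⟩
    have hplen : pre.length + v.length = t := by
      have := congrArg List.length hpre
      simpa [Nat.min_eq_left ht] using this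
    refine ⟨r.drop t, ?_⟩
    have hsplit : r.drop (t - v.length) = (r.take t).drop (t - v.length) ++ r.drop t := by
      rw [← List.drop_append_of_le_length (by simp [Nat.min_eq_left ht])]
      simp [List.take_append_drop]
    rw [hsplit, ← hpre]
    have hpl : pre.length = t - v.length := by omega
    simp [← hpl]
  · rintro ⟨suf, hsuf⟩
    refine ⟨r.take (t - v.length), ?_⟩
    have hr : r = r.take (t - v.length) ++ (v ++ suf) := by
      rw [hsuf]; exact (List.take_append_drop _ r).symm
    have hlen1 : (r.take (t - v.length)).length = t - v.length := by
      simp [Nat.min_eq_left (by omega : t - v.length ≤ r.length)]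
    have key : r.take t = r.take (t - v.length) ++ v := by
      calc r.take t = (r.take (t - v.length) ++ (v ++ suf)).take t := by rw [← hr]
        _ = r.take (t - v.length) ++ (v ++ suf).take (t - (t - v.length)) := by
            rw [List.take_append, List.take_of_length_le (by omega), hlen1]
        _ = r.take (t - v.length) ++ v := by
            have h2 : t - (t - v.length) = v.length := by omega
            simp [h2]
    exact key.symm

-- a prefix of a reversal is a reversed suffix
theorem pvPrefixRev (w x : List Char) : w <+: x.reverse ↔ w.reverse <:+ x := by
  constructor
  · intro h
    have h2 : w.reverse.reverse <+: x.reverse := by simpa using h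
    simpa using List.reverse_prefix.mp h2
  · intro h
    simpa using List.reverse_prefix.mpr h

-- occurrence of w at k in r.reverse ↔ occurrence of w.reverse at L - |w| - k in r
theorem pvOccRev {r w : List Char} {k : Nat} (hk : k + w.length ≤ r.length) :
    w <+: r.reverse.drop k ↔ w.reverse <+: r.drop (r.length - w.length - k) := by
  rw [List.drop_reverse]
  have e1 : r.length - k - w.length = r.length - w.length - k := by omega
  have hwr : w.reverse.length ≤ r.length - k := by simp; omega
  constructor
  · intro h
    have h1 : w.reverse <:+ r.take (r.length - k) := (pvPrefixRev _ _).mp h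
    have h2 := (pvSuffixTake (by omega) hwr).mp h1
    rw [List.length_reverse, e1] at h2
    exact h2
  · intro h
    have h2 : w.reverse <+: r.drop (r.length - k - w.reverse.length) := by
      rw [List.length_reverse, e1]; exact h
    have h1 := (pvSuffixTake (t := r.length - k) (by omega) hwr).mpr h2
    exact (pvPrefixRev _ _).mpr h1

-- the guard:  l in reversed(row)  ↔  row.rfind(reversed(l)) != -1
theorem pvGuardIff (r w : List Char) :
    PySem.Chars.isIn w r.reverse = true ↔ PySem.Chars.rfind r w.reverse ≠ -1 := by
  have hdef : PySem.Chars.rfind r w.reverse = PySem.Chars.rfind.go r w.reverse r.length := rfl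
  rw [hdef]
  constructor
  · intro hin hneg
    rcases pvGoCases r w.reverse r.length with ⟨_, hnone⟩ | ⟨n, hn, _, _, _⟩
    · obtain ⟨k, hk⟩ := (PySem.Chars.exists_prefix_drop_iff_isIn w r.reverse).mpr hin
      by_cases hw : w = []
      · exact hnone r.length (le_refl _) (by simp [hw])
      · have hb := pvOccBound hw (by simpa using hk)
        have := (pvOccRev (by simpa using hb)).mp hk
        exact hnone _ (by omega) this
    · rw [hn] at hneg; omega
  · intro hne
    rcases pvGoCases r w.reverse r.length with ⟨h1, _⟩ | ⟨n, hn, hle, hocc, _⟩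
    · exact absurd h1 hne
    · by_cases hw : w = []
      · simp [hw, PySem.Chars.isIn_nil]
      · have hwr : w.reverse ≠ [] := by simpa using hw
        have hb := pvOccBound hwr hocc
        rw [List.length_reverse] at hb
        have hk : r.length - w.length - n + w.length ≤ r.length := by omega
        have : w <+: r.reverse.drop (r.length - w.length - n) := by
          rw [pvOccRev hk]
          have e : r.length - w.length - (r.length - w.length - n) = n := by omega
          rw [e]; exact hocc
        exact (PySem.Chars.exists_prefix_drop_iff_isIn w r.reverse).mp ⟨_, this⟩

-- the column:  reversed(row).index(l) = len(row) - len(l) - row.rfind(reversed(l))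
theorem pvColEq (r w : List Char) (h : PySem.Chars.rfind r w.reverse ≠ -1) :
    PySem.Chars.find r.reverse w = (r.length : Int) - w.length - PySem.Chars.rfind r w.reverse := by
  have hdef : PySem.Chars.rfind r w.reverse = PySem.Chars.rfind.go r w.reverse r.length := rfl
  rcases pvGoCases r w.reverse r.length with ⟨h1, _⟩ | ⟨n, hn, hle, hocc, hmax⟩
  · rw [hdef] at h; exact absurd h1 h
  · rw [hdef, hn]
    by_cases hw : w = []
    · have hnL : n = r.length := by
        by_contra hne
        exact hmax r.length (by omega) (le_refl _) (by simp [hw])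
      simp [hw, PySem.Chars.find_nil, hnL]
    · have hwr : w.reverse ≠ [] := by simpa using hw
      have hb := pvOccBound hwr hocc
      rw [List.length_reverse] at hb
      set k0 := r.length - w.length - n with hk0
      have hk0occ : w <+: r.reverse.drop k0 := by
        rw [pvOccRev (by omega)]
        have e : r.length - w.length - k0 = n := by omega
        rw [e]; exact hocc
      have hinf : 0 ≤ PySem.Chars.find r.reverse w := by
        rw [PySem.Chars.find_nonneg_iff, ← PySem.Chars.isIn_iff_infix]
        exact (PySem.Chars.exists_prefix_drop_iff_isIn w r.reverse).mp ⟨_, hk0occ⟩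
      obtain ⟨hfocc, hfmin⟩ := PySem.Chars.find_spec hinf
      set f := (PySem.Chars.find r.reverse w).toNat with hf
      have hfk0 : f = k0 := by
        have hle1 : f ≤ k0 := by
          by_contra hlt
          exact (hfmin k0 (by omega)) hk0occ
        have hge : k0 ≤ f := by
          by_contra hlt
          have hbf := pvOccBound hw hfocc
          rw [List.length_reverse] at hbf
          have hp := (pvOccRev (by omega : f + w.length ≤ r.length)).mp hfocc
          exact hmax (r.length - w.length - f) (by omega) (by omega) hp
        omega
      have hfi : PySem.Chars.find r.reverse w = (f : Int) := (Int.toNat_of_nonneg hinf).symm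
      rw [hfi, hfk0, hk0]
      omega

-- folding B's slot-building step over pairs never disturbs a key already present
theorem pvSlotsAux2 (w : String) (pl : List (Int × String)) (d : PySem.Dict String Int)
    (hc : d.contains w = true) :
    (pl.foldl (fun slot jw => if slot.contains jw.2 then slot else slot.insert jw.2 jw.1) d).get? w = d.get? w := by
  induction pl generalizing d with
  | nil => rfl
  | cons p t ih =>
    simp only [List.foldl_cons]
    by_cases hp : d.contains p.2
    · rw [if_pos hp, ih d hc]
    · rw [if_neg hp]
      have hne : w ≠ p.2 := fun he => hp (he ▸ hc)
      rw [ih _ (by rw [PySem.Dict.contains_insert]; simp [hc]),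
        PySem.Dict.get?_insert_of_ne _ _ hne]

-- B's slot loop records s + (first index of w) for every w in the remaining list
theorem pvSlotsAux (w : String) (l : List String) : ∀ (s : Int) (d : PySem.Dict String Int),
    w ∈ l → d.contains w = false →
    ((PySem.List.enumerate l s).foldl (fun slot jw => if slot.contains jw.2 then slot else slot.insert jw.2 jw.1) d).get? w = some (s + l.idxOf w) := by
  induction l with
  | nil => intro s d h; simp at h
  | cons a t ih =>
    intro s d hmem hc
    rw [PySem.List.enumerate_cons]
    simp only [List.foldl_cons]
    by_cases hw : w = a
    · subst hw
      rw [if_neg (by simpa using hc)]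
      rw [pvSlotsAux2 w _ _ (by rw [PySem.Dict.contains_insert]; simp)]
      rw [PySem.Dict.get?_insert_self]
      simp [List.idxOf_cons_self]
    · have hmem' : w ∈ t := by
        rcases List.mem_cons.mp hmem with h | h
        · exact absurd h hw
        · exact h
      have hidx : (a :: t).idxOf w = t.idxOf w + 1 := by
        simp [Ne.symm hw]
      by_cases hca : d.contains a
      · rw [if_pos (by simpa using hca)]
        rw [ih (s+1) d hmem' hc, hidx]
        congr 1; push_cast; ring
      · rw [if_neg (by simpa using hca)]
        rw [ih (s+1) _ hmem' (by rw [PySem.Dict.contains_insert]; simp [hc, hw])]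
        rw [hidx]; congr 1; push_cast; ring

-- the slot dict holds each word's first index in wordList
theorem pvSlotsGetD (wordList : List String) (w : String) (hw : w ∈ wordList) :
    (pvSlots wordList).getD w 0 = (wordList.idxOf w : Int) := by
  rw [PySem.Dict.getD_eq_get?_getD]
  unfold pvSlots
  rw [pvSlotsAux w wordList 0 PySem.Dict.empty hw (by rfl)]
  simp

-- list.index of a member is its idxOf
theorem pvIndex? (l : List String) (w : String) (h : w ∈ l) :
    PySem.List.index? l w = some (l.idxOf w) := by
  induction l with
  | nil => simp at h
  | cons a t ih =>
    by_cases hw : a = w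
    · subst hw
      rw [PySem.List.index?_cons_self]
      simp [List.idxOf_cons_self]
    · have hm : w ∈ t := by
        rcases List.mem_cons.mp h with h' | h'
        · exact absurd h'.symm hw
        · exact h'
      rw [PySem.List.index?_cons_of_ne t hw, ih hm]
      simp [hw]

-- the two ports agree on every input
theorem pvMain (wordList wordInfoList puzzle : List String) :
    findBackward wordList wordInfoList puzzle = findBackward_alt wordList wordInfoList puzzle := by
  unfold findBackward findBackward_alt
  simp only []
  rw [PySem.List.enumerate_eq_map_pyRange puzzle "", List.foldl_map]
  have hlen : PySem.List.len (pvReverseList puzzle) = PySem.List.len puzzle := by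
    simp [pvReverseList, PySem.List.len_eq]
  rw [hlen]
  apply PySem.List.foldl_congr_mem
  intro acc i hi
  rw [PySem.List.mem_pyRange_one] at hi
  rw [List.foldl_map]
  apply PySem.List.foldl_congr_mem
  intro acc2 l hl
  have hil : i < (puzzle.length : Int) := by simpa [PySem.List.len_eq] using hi.2
  have hrowB : PySem.List.pyGetD puzzle i "" = puzzle[i.toNat]'(by omega) :=
    PySem.List.pyGetD_eq_getElem puzzle "" hi.1 (by simpa [PySem.List.len_eq] using hi.2)
  have hrowA : PySem.List.pyGetD (pvReverseList puzzle) i [] =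
      (puzzle[i.toNat]'(by omega)).toList.reverse := by
    rw [PySem.List.pyGetD_eq_getElem (pvReverseList puzzle) [] hi.1
      (by simpa [pvReverseList, PySem.List.len_eq] using hi.2)]
    simp [pvReverseList]
  set row := puzzle[i.toNat]'(by omega) with hrow
  have hrev : (PySem.Str.slice? l none none (-1)).getD "" = String.ofList l.toList.reverse := by
    rw [PySem.Str.slice?_none_none_neg_one]; rfl
  have hrfind : PySem.Str.rfind (PySem.List.pyGetD puzzle i "")
      ((PySem.Str.slice? l none none (-1)).getD "") =
      PySem.Chars.rfind row.toList l.toList.reverse := by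
    rw [hrev, hrowB, PySem.Str.rfind_eq, String.toList_ofList]
  rw [hrowA, hrfind]
  by_cases hg : PySem.Chars.rfind row.toList l.toList.reverse ≠ -1
  · rw [if_pos ((pvGuardIff row.toList l.toList).mpr hg), if_pos hg]
    congr 1
    · rw [pvSlotsGetD wordList l hl, pvIndex? wordList l hl]
      simp
    · rw [pvColEq row.toList l.toList hg]
      have hL : PySem.Str.len row = (row.toList.length : Int) := by
        simp [PySem.Str.len_eq]
      have hW : PySem.Str.len l = (l.toList.length : Int) := by
        simp [PySem.Str.len_eq]
      simp only [hrowB, hL, hW]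
      congr 1
      ring
  · rw [if_neg (fun hc => hg ((pvGuardIff row.toList l.toList).mp hc)), if_neg hg]

-- ===== VERDICT (by name: the statement is the Claim_ definition above) =====
theorem findBackward_spec : Claim_equal_findBackward := by
  intro wordList wordInfoList puzzle _ _
  unfold Spec_findBackward
  exact pvMain wordList wordInfoList puzzle
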